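-- pv_equiv track=rewrite | github.com/Bhargav9t/Day-based-probability-tracker | application.py | compute_reachable_counts
-- ===== SOURCE A (Python) =====
-- def compute_reachable_counts(max_number=65):
--     """Compute how many of the days 1..31 can reach each number 1..max_number
--     by multiplying the day by positive integers until the product exceeds max_number.
--     Returns: dict number -> set(days)
--     """
--     reachable = {n: set() for n in range(1, max_number + 1)}
--     for day in range(1, 32):  # days 1..31
--         multiple = 1
--         while True:
--             val = day * multiple
--             if val > max_number:
--                 break
--             reachable[val].add(day)
--             multiple += 1
--     return reachable
-- ===== SOURCE B (Python) =====
-- def compute_reachable_counts(max_number=65):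
--     """Per-number trial-division scan: day d (1..31) reaches n iff d divides n."""
--     reachable = {}
--     for n in range(1, max_number + 1):
--         days = set()
--         for day in range(1, 32):
--             if n % day == 0:
--                 days.add(day)
--         reachable[n] = days
--     return reachable
-- ===== Notes on version B (the rewrite author's own statement) =====
-- stated objective: alternative
-- what changed: Replaces the outer-day/inner-multiple sieve (a while loop marking multiples of each day into a pre-initialized dict) with the dual per-number traversal that builds each number's day-set directly by trial divisibility (n % day == 0).
import Mathlib
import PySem

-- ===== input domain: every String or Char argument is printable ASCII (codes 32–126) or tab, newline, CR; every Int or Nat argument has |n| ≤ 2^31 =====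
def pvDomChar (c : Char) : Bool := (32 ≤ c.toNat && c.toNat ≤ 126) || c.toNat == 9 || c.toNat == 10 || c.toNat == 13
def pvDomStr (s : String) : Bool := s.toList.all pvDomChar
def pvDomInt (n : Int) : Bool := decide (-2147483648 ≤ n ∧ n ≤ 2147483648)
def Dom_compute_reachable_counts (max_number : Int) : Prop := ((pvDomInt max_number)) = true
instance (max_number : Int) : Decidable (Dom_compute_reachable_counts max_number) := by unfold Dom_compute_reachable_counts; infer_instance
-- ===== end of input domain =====

-- B replaces A's outer-day/inner-multiple sieve with the dual per-number trial-division scan (same cost class; alternative algorithm).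


-- ===== PORT A =====
-- A's inner 'while True: val = day * multiple; if val > max_number: break; reachable[val].add(day); multiple += 1'.
-- The 'day ≤ 0' test is only a totality guard; A only calls this with day ∈ 1..31, where it never fires.
def crcSieve (max_number day : Int) (reach : PySem.Dict Int (PySem.Set Int)) (mult : Int) :
    PySem.Dict Int (PySem.Set Int) :=
  if _h : max_number < day * mult then reach
  else if _hd : day ≤ 0 then reach
  else crcSieve max_number day
    (reach.modify (day * mult) PySem.Set.empty (fun s => PySem.Set.add s day)) (mult + 1)
termination_by (max_number + 1 - day * mult).toNat
decreasing_by
  have : day * (mult + 1) = day * mult + day := by ring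
  omega

def compute_reachable_counts (max_number : Int) : List (Int × List Int) :=
  -- reachable = {n: set() for n in range(1, max_number + 1)}
  let reach := (PySem.List.pyRange 1 (max_number + 1) 1).foldl
    (fun d n => d.insert n (PySem.Set.empty : PySem.Set Int)) PySem.Dict.empty
  -- for day in range(1, 32): multiple = 1; while True: …
  ((PySem.List.pyRange 1 32 1).foldl (fun r day => crcSieve max_number day r 1) reach).items

-- ===== PORT B =====
def compute_reachable_counts_alt (max_number : Int) : List (Int × List Int) :=
  (PySem.List.pyRange 1 (max_number + 1) 1).map (fun n =>
    (n, (PySem.List.pyRange 1 32 1).foldl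
      (fun days day => if PySem.Int.mod n day = 0 then PySem.Set.add days day else days)
      (PySem.Set.empty : PySem.Set Int)))

-- ===== PRECONDITION & SPEC =====
def Spec_compute_reachable_counts (max_number : Int) (out : List (Int × List Int)) : Prop := out = compute_reachable_counts_alt max_number
instance (max_number : Int) (out : List (Int × List Int)) : Decidable (Spec_compute_reachable_counts max_number out) := by unfold Spec_compute_reachable_counts; infer_instance

-- ===== CLAIM (what is proved, stated in full; the proofs are below) =====
def Claim_equal_compute_reachable_counts : Prop := ∀ (max_number : Int), Dom_compute_reachable_counts max_number → Spec_compute_reachable_counts max_number (compute_reachable_counts max_number)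

-- ===== LEMMAS AND PROOFS =====

-- Value of the sieve at key n: 'day' is added exactly once, at the multiple n / day.
theorem crcSieve_getD (max_number day : Int) (hd : 0 < day) (n : Int) :
    ∀ (reach : PySem.Dict Int (PySem.Set Int)) (mult : Int),
    (crcSieve max_number day reach mult).getD n PySem.Set.empty =
      if day ∣ n ∧ day * mult ≤ n ∧ n ≤ max_number then
        PySem.Set.add (reach.getD n PySem.Set.empty) day
      else reach.getD n PySem.Set.empty := by
  intro reach mult
  induction reach, mult using crcSieve.induct max_number day with
  | case1 reach mult h =>
    rw [crcSieve, dif_pos h, if_neg (by rintro ⟨-, h2, h3⟩; omega)]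
  | case2 reach mult h hd0 => omega
  | case3 reach mult h hd0 ih =>
    rw [crcSieve, dif_neg h, dif_neg hd0, ih]
    rw [PySem.Dict.getD_modify]
    by_cases hn : n = day * mult
    · subst hn
      rw [if_pos rfl, if_neg (by
          rintro ⟨-, hle, -⟩
          have : day * (mult + 1) = day * mult + day := by ring
          omega),
        if_pos ⟨⟨mult, by ring⟩, le_refl _, by omega⟩]
    · rw [if_neg hn]
      apply if_congr _ rfl rfl
      have hmm : day * (mult + 1) = day * mult + day := by ring
      refine Iff.intro ?_ ?_ <;> intro hc
      · obtain ⟨⟨k, hk⟩, h2, h3⟩ := hc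
        exact ⟨⟨k, hk⟩, by omega, h3⟩
      · obtain ⟨⟨k, hk⟩, h2, h3⟩ := hc
        refine ⟨⟨k, hk⟩, ?_, h3⟩
        have hkm : mult ≤ k := le_of_mul_le_mul_left (by rw [← hk]; exact h2) hd
        rcases lt_or_eq_of_le hkm with hlt | he
        · have : day * (mult + 1) ≤ day * k :=
            mul_le_mul_of_nonneg_left (by omega) (le_of_lt hd)
          omega
        · exfalso; apply hn; rw [hk, ← he]

-- The sieve only modifies keys already present, so the key list is unchanged.
theorem crcSieve_keys (max_number day : Int) (hd : 0 < day) :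
    ∀ (reach : PySem.Dict Int (PySem.Set Int)) (mult : Int), 0 < mult →
    (∀ v : Int, 0 < v → v ≤ max_number → reach.contains v = true) →
    (crcSieve max_number day reach mult).keys = reach.keys := by
  intro reach mult
  induction reach, mult using crcSieve.induct max_number day with
  | case1 reach mult h => intro _ _; rw [crcSieve, dif_pos h]
  | case2 reach mult h hd0 => omega
  | case3 reach mult h hd0 ih =>
    intro hm hc
    have hcv : reach.contains (day * mult) = true :=
      hc _ (by positivity) (by omega)
    have hkeys : (reach.modify (day * mult) PySem.Set.empty fun s => s.add day).keys = reach.keys := by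
      rw [PySem.Dict.keys_modify, PySem.Dict.keys_insert_of_contains _ _ hcv]
    rw [crcSieve, dif_neg h, dif_neg hd0, ih (by omega)]
    · exact hkeys
    · intro v hv1 hv2
      rw [PySem.Dict.contains_modify]
      simp [hc v hv1 hv2]

-- The day loop, seen at one key n (1 ≤ n ≤ max_number): it appends exactly the dividing days, in order.
theorem crcDayFold (max_number : Int) (ds : List Int) (hds : ∀ d ∈ ds, 0 < d) :
    ∀ (reach : PySem.Dict Int (PySem.Set Int)),
    (∀ v : Int, 0 < v → v ≤ max_number → reach.contains v = true) →
    (ds.foldl (fun r day => crcSieve max_number day r 1) reach).keys = reach.keys ∧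
    ∀ n : Int, 0 < n → n ≤ max_number →
      (ds.foldl (fun r day => crcSieve max_number day r 1) reach).getD n PySem.Set.empty =
        ds.foldl (fun s d => if d ∣ n then PySem.Set.add s d else s)
          (reach.getD n PySem.Set.empty) := by
  induction ds with
  | nil => intro reach _; exact ⟨rfl, fun _ _ _ => rfl⟩
  | cons d ds ih =>
    intro reach hc
    have hd : 0 < d := hds d List.mem_cons_self
    have hds' : ∀ d' ∈ ds, 0 < d' := fun d' h' => hds d' (List.mem_cons_of_mem _ h')
    have hk1 : (crcSieve max_number d reach 1).keys = reach.keys :=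
      crcSieve_keys max_number d hd reach 1 one_pos hc
    have hc' : ∀ v : Int, 0 < v → v ≤ max_number → (crcSieve max_number d reach 1).contains v = true := by
      intro v hv1 hv2
      rw [PySem.Dict.contains_iff_mem_keys, hk1, ← PySem.Dict.contains_iff_mem_keys]
      exact hc v hv1 hv2
    obtain ⟨ihk, ihg⟩ := ih hds' (crcSieve max_number d reach 1) hc'
    refine ⟨by rw [List.foldl_cons, ihk, hk1], ?_⟩
    intro n hn1 hn2
    rw [List.foldl_cons, List.foldl_cons, ihg n hn1 hn2, crcSieve_getD max_number d hd n reach 1]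
    by_cases hdvd : d ∣ n
    · rw [if_pos ⟨hdvd, by simpa using Int.le_of_dvd hn1 hdvd, hn2⟩, if_pos hdvd]
    · rw [if_neg (by rintro ⟨h1, -, -⟩; exact hdvd h1), if_neg hdvd]

-- The initializing loop never changes the (empty-set) default lookup.
theorem crcInit_getD (l : List Int) (n : Int) :
    ∀ d : PySem.Dict Int (PySem.Set Int), d.getD n PySem.Set.empty = PySem.Set.empty →
    (l.foldl (fun d k => d.insert k (PySem.Set.empty : PySem.Set Int)) d).getD n PySem.Set.empty
      = PySem.Set.empty := by
  induction l with
  | nil => intro d h; exact h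
  | cons k l ih =>
    intro d h
    refine ih _ ?_
    rw [PySem.Dict.getD_insert]
    split_ifs <;> [rfl; exact h]

-- ===== VERDICT (by name: the statement is the Claim_ definition above) =====
theorem compute_reachable_counts_spec : Claim_equal_compute_reachable_counts := by
  intro max_number _
  unfold Spec_compute_reachable_counts compute_reachable_counts compute_reachable_counts_alt
  set l := PySem.List.pyRange 1 (max_number + 1) 1 with hl
  set days := PySem.List.pyRange 1 32 1 with hdays
  set reach0 := l.foldl (fun d n => d.insert n (PySem.Set.empty : PySem.Set Int)) PySem.Dict.empty
    with hreach0
  have hnodupl : l.Nodup := PySem.List.nodup_pyRange_one 1 (max_number + 1)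
  have hitems0 : reach0.items = l.map (fun n => (n, (PySem.Set.empty : PySem.Set Int))) := by
    have h := PySem.Dict.items_foldl_insert_fresh l id (fun _ => (PySem.Set.empty : PySem.Set Int))
      PySem.Dict.empty (fun a _ => PySem.Dict.contains_empty a) (by simpa using hnodupl)
    simpa [PySem.Dict.items] using h
  have hkeys0 : reach0.keys = l := by
    simp only [PySem.Dict.keys, hitems0, List.map_map]
    show l.map id = l
    exact List.map_id l
  have hc0 : ∀ v : Int, 0 < v → v ≤ max_number → reach0.contains v = true := by
    intro v hv1 hv2
    rw [PySem.Dict.contains_iff_mem_keys, hkeys0, hl, PySem.List.mem_pyRange_one]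
    omega
  have hdaypos : ∀ d ∈ days, 0 < d := by
    intro d hdm
    rw [hdays, PySem.List.mem_pyRange_one] at hdm
    omega
  obtain ⟨hkeys, hget⟩ := crcDayFold max_number days hdaypos reach0 hc0
  set D := days.foldl (fun r day => crcSieve max_number day r 1) reach0 with hD
  rw [PySem.Dict.items_eq_map_keys D (by rw [hkeys, hkeys0]; exact hnodupl) PySem.Set.empty,
    hkeys, hkeys0]
  apply List.map_congr_left
  intro k hk
  have hk' : 1 ≤ k ∧ k < max_number + 1 := (PySem.List.mem_pyRange_one).mp (hl ▸ hk)
  have hget0 : reach0.getD k PySem.Set.empty = PySem.Set.empty :=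
    crcInit_getD l k PySem.Dict.empty (PySem.Dict.getD_empty _ _) 
  rw [hget k (by omega) (by omega), hget0]
  refine congrArg _ ?_
  apply PySem.List.foldl_congr_mem
  intro acc d hdm
  have hd0 : 0 < d := hdaypos d hdm
  by_cases hdvd : d ∣ k
  · rw [if_pos hdvd, if_pos ((PySem.Int.mod_eq_zero_iff_dvd k d).mpr hdvd)]
  · rw [if_neg hdvd, if_neg (fun hm => hdvd ((PySem.Int.mod_eq_zero_iff_dvd k d).mp hm))]
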